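-- pv_equiv track=rewrite | github.com/TayTT/MIDIBytes | models/sample.py | remove_unmatched_brackets
-- ===== SOURCE A (Python) =====
-- def remove_unmatched_brackets(s):
--     stack = []
--     for i, char in enumerate(s):
--         if char == "[":
--             stack.append(i)
--         elif char == "]":
--             if stack:
--                 stack.pop()
--             else:
--                 return s[:i]  # Ucięcie ciągu w przypadku niezamkniętego nawiasu
--     if stack:
--         s = s[:stack[-1]] # Ucięcie ciągu w przypadku pozostałych niezamkniętych nawiasów
--     if s[-1] == ',':
--         s = s[:-1]
--     return s
-- ===== SOURCE B (Python) =====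
-- def remove_unmatched_brackets(s):
--     # depth-counter pass; then a right-to-left cancellation pass for leftover opens
--     depth = 0
--     for i, ch in enumerate(s):
--         if ch == '[':
--             depth += 1
--         elif ch == ']':
--             if depth == 0:
--                 return s[:i]
--             depth -= 1
--     pending = 0
--     for i in range(len(s) - 1, -1, -1):
--         ch = s[i]
--         if ch == ']':
--             pending += 1
--         elif ch == '[':
--             if pending == 0:
--                 s = s[:i]
--                 break
--             pending -= 1
--     return s[:-1] if s.endswith(',') else s
-- ===== Notes on version B (the rewrite author's own statement) =====
-- stated objective: alternative
-- what changed: Replaced A's stack of '[' indices by a depth counter for the unmatched-']' early return plus a second right-to-left cancellation pass that locates the last unmatched '[' directly, so no index stack is ever built.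
import Mathlib
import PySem

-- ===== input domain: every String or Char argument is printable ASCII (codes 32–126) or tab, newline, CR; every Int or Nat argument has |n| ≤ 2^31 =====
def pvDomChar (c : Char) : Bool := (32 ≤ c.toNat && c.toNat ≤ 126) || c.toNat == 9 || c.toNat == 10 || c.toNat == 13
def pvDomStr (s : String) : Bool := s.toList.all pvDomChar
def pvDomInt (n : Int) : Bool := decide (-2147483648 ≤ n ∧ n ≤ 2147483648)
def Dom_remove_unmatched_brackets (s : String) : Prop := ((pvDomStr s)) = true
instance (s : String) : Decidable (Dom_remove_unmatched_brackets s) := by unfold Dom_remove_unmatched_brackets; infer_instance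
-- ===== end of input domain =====

-- B replaces A's index stack by a depth counter plus a second, right-to-left cancellation
-- pass that locates the last unmatched '[' (objective: alternative; same O(n) cost).

-- ===== PORT A =====
-- A's loop: stack of indices of unhandled '['; early return (.inl i) on an unmatched ']'.
def pvLoopA : List Char → Nat → List Nat → Sum Nat (List Nat)
  | [], _, st => .inr st
  | c :: cs, i, st =>
    if c = '[' then pvLoopA cs (i + 1) (i :: st)
    else if c = ']' then
      match st with
      | [] => .inl i
      | _ :: t => pvLoopA cs (i + 1) t
    else pvLoopA cs (i + 1) st

-- A's trailing-comma trim. Python's `s[-1]` raises IndexError on the empty string;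
-- Pre_ excludes exactly those inputs, so the "" of the none-branch is a junk value
-- reached only outside Pre_.
def pvTrimA (l2 : List Char) : String :=
  match l2.getLast? with
  | some c => if c = ',' then String.ofList l2.dropLast else String.ofList l2
  | none => ""

def remove_unmatched_brackets (s : String) : String :=
  match pvLoopA s.toList 0 [] with
  | .inl i => String.ofList (s.toList.take i)      -- return s[:i]
  | .inr st =>
    pvTrimA (match st with
             | j :: _ => s.toList.take j           -- s = s[:stack[-1]]
             | [] => s.toList)

-- ===== PORT B =====
-- pass 1: bracket depth; first ']' seen at depth 0 → its index
def pvPass1 : List Char → Nat → Nat → Option Nat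
  | [], _, _ => none
  | c :: cs, i, d =>
    if c = '[' then pvPass1 cs (i + 1) (d + 1)
    else if c = ']' then
      if d = 0 then some i else pvPass1 cs (i + 1) (d - 1)
    else pvPass1 cs (i + 1) d

-- pass 2 (input reversed, i = index in the original string): cancel the ']' seen so far
-- against each '['; the first '[' with no pending ']' is the last unmatched open.
def pvPass2 : List Char → Nat → Nat → Option Nat
  | [], _, _ => none
  | c :: cs, i, p =>
    if c = ']' then pvPass2 cs (i - 1) (p + 1)
    else if c = '[' then
      if p = 0 then some i else pvPass2 cs (i - 1) (p - 1)
    else pvPass2 cs (i - 1) p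

-- return s[:-1] if s.endswith(',') else s
def pvTrimB (l2 : List Char) : String :=
  match l2.getLast? with
  | some c => if c = ',' then String.ofList l2.dropLast else String.ofList l2
  | none => String.ofList l2

def remove_unmatched_brackets_alt (s : String) : String :=
  match pvPass1 s.toList 0 0 with
  | some i => String.ofList (s.toList.take i)
  | none =>
    pvTrimB (match pvPass2 s.toList.reverse (s.toList.length - 1) 0 with
             | some j => s.toList.take j
             | none => s.toList)

-- ===== PRECONDITION & SPEC =====
-- bracket balance of a prefix: count '[' minus count ']'
def pvBal : List Char → Int
  | [] => 0
  | c :: cs => (if c = '[' then 1 else if c = ']' then -1 else 0) + pvBal cs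

-- some ']' occurs at balance 0 (A returns early there, before ever reading s[-1])
def pvHasUnmatchedClose (l : List Char) : Prop :=
  ∃ n, n < l.length ∧ l[n]? = some ']' ∧ pvBal (l.take n) = 0

-- the single unmatched '[' is the first character: A truncates s to "" and then reads s[-1]
def pvTruncatesToEmpty (l : List Char) : Prop :=
  l.head? = some '[' ∧ pvBal l = 1 ∧ ∀ n, n ≤ l.length → 1 ≤ n → 1 ≤ pvBal (l.take n)

-- Pre_ excludes exactly the inputs on which Python A raises IndexError at `s[-1]`:
-- the empty string, and strings whose only unmatched '[' is the first character
-- (A truncates them to "" first). A returns normally on every input admitted here.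
def Pre_remove_unmatched_brackets (s : String) : Prop :=
  pvHasUnmatchedClose s.toList ∨ (s.toList ≠ [] ∧ ¬ pvTruncatesToEmpty s.toList)

instance (s : String) : Decidable (Pre_remove_unmatched_brackets s) := by
  unfold Pre_remove_unmatched_brackets pvHasUnmatchedClose pvTruncatesToEmpty; infer_instance

def pvWitness_remove_unmatched_brackets : String := "a[b],"

def Spec_remove_unmatched_brackets (s : String) (out : String) : Prop := out = remove_unmatched_brackets_alt s
instance (s : String) (out : String) : Decidable (Spec_remove_unmatched_brackets s out) := by unfold Spec_remove_unmatched_brackets; infer_instance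

-- ===== CLAIM (what is proved, stated in full; the proofs are below) =====
def Claim_equal_remove_unmatched_brackets : Prop := ∀ (s : String), Dom_remove_unmatched_brackets s → Pre_remove_unmatched_brackets s → Spec_remove_unmatched_brackets s (remove_unmatched_brackets s)


-- ===== LEMMAS AND PROOFS =====

-- the two trailing-comma trims agree everywhere (A's "" junk branch is only reached on [])
theorem pvTrim_eq (l2 : List Char) : pvTrimA l2 = pvTrimB l2 := by
  unfold pvTrimA pvTrimB
  cases hl : l2.getLast? with
  | some c => rfl
  | none =>
    have : l2 = [] := List.getLast?_eq_none_iff.mp hl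
    simp [this]

-- pass 1 signals exactly when A's loop returns early, with the same index
theorem pvPass1_eq_loopA : ∀ (cs : List Char) (i : Nat) (st : List Nat),
    pvPass1 cs i st.length =
      (match pvLoopA cs i st with | .inl j => some j | .inr _ => none) := by
  intro cs
  induction cs with
  | nil => intro i st; simp [pvPass1, pvLoopA]
  | cons c cs ih =>
    intro i st
    by_cases h1 : c = '['
    · simpa [pvPass1, pvLoopA, h1] using ih (i + 1) (i :: st)
    · by_cases h2 : c = ']'
      · cases st with
        | nil => simp [pvPass1, pvLoopA, h1, h2]
        | cons k t =>
          simpa [pvPass1, pvLoopA, h1, h2] using ih (i + 1) t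
      · simpa [pvPass1, pvLoopA, h1, h2] using ih (i + 1) st

-- ghost version of pass 2 that also returns the final pending count
def pvPass2P : List Char → Nat → Nat → Option Nat × Nat
  | [], _, p => (none, p)
  | c :: cs, i, p =>
    if c = ']' then pvPass2P cs (i - 1) (p + 1)
    else if c = '[' then
      if p = 0 then (some i, p) else pvPass2P cs (i - 1) (p - 1)
    else pvPass2P cs (i - 1) p

theorem pvPass2_eq_P : ∀ (cs : List Char) (i p : Nat),
    pvPass2 cs i p = (pvPass2P cs i p).1 := by
  intro cs
  induction cs with
  | nil => intro i p; simp [pvPass2, pvPass2P]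
  | cons c cs ih =>
    intro i p
    by_cases h1 : c = ']'
    · simpa [pvPass2, pvPass2P, h1] using ih (i - 1) (p + 1)
    · by_cases h2 : c = '['
      · by_cases h3 : p = 0
        · simp [pvPass2, pvPass2P, h1, h2, h3]
        · simpa [pvPass2, pvPass2P, h1, h2, h3] using ih (i - 1) (p - 1)
      · simpa [pvPass2, pvPass2P, h1, h2] using ih (i - 1) p

-- appending one (leftmost-in-the-original) character to the reversed scan
theorem pvPass2P_append : ∀ (rl : List Char) (c : Char) (i p : Nat),
    pvPass2P (rl ++ [c]) i p =
      (match pvPass2P rl i p with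
       | (some j, q) => (some j, q)
       | (none, q) =>
         if c = ']' then (none, q + 1)
         else if c = '[' then
           if q = 0 then (some (i - rl.length), q) else (none, q - 1)
         else (none, q)) := by
  intro rl
  induction rl with
  | nil => intro c i p; simp [pvPass2P]
  | cons c' rl ih =>
    intro c i p
    by_cases h1 : c' = ']'
    · simpa [pvPass2P, h1, Nat.sub_sub, Nat.add_comm] using ih c (i - 1) (p + 1)
    · by_cases h2 : c' = '['
      · by_cases h3 : p = 0
        · simp [pvPass2P, h1, h2, h3]
        · simpa [pvPass2P, h1, h2, h3, Nat.sub_sub, Nat.add_comm] using ih c (i - 1) (p - 1)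
      · simpa [pvPass2P, h1, h2, Nat.sub_sub, Nat.add_comm] using ih c (i - 1) p

theorem pvG : ∀ (cs : List Char) (i : Nat) (st st' : List Nat),
    pvLoopA cs i st = .inr st' →
    (∀ j, (pvPass2P cs.reverse (i + cs.length - 1) 0).1 = some j → st'.head? = some j)
    ∧ ((pvPass2P cs.reverse (i + cs.length - 1) 0).1 = none →
        st' = st.drop (pvPass2P cs.reverse (i + cs.length - 1) 0).2
        ∧ (pvPass2P cs.reverse (i + cs.length - 1) 0).2 ≤ st.length) := by
  intro cs
  induction cs with
  | nil =>
    intro i st st' h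
    simp [pvLoopA] at h
    subst h
    simp [pvPass2P]
  | cons c cs ih =>
    intro i st st' h
    have hrev : (c :: cs).reverse = cs.reverse ++ [c] := by simp
    have hidx : i + (c :: cs).length - 1 = i + cs.length := by
      simp only [List.length_cons]; omega
    have hidx2 : (i + 1) + cs.length - 1 = i + cs.length := by omega
    rw [hrev, hidx, pvPass2P_append]
    by_cases h1 : c = '['
    · subst h1
      simp only [pvLoopA, Char.reduceEq, reduceIte] at h
      have hmain := ih (i + 1) (i :: st) st' h
      rw [hidx2] at hmain
      rcases hP : pvPass2P cs.reverse (i + cs.length) 0 with ⟨r, q⟩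
      rw [hP] at hmain
      cases r with
      | some j =>
        simp only [List.length_reverse, Nat.add_sub_cancel]
        exact ⟨fun j' hj' => by cases hj'; exact hmain.1 _ rfl,
               fun hc => by simp at hc⟩
      | none =>
        simp only [List.length_reverse, Nat.add_sub_cancel, Char.reduceEq, reduceIte]
        have hd := hmain.2 rfl
        simp only at hd
        by_cases hq : q = 0
        · subst hq
          simp only [Char.reduceEq, reduceIte]
          have hst : st' = i :: st := by simpa using hd.1
          exact ⟨fun j hj => by cases hj; simp [hst],
                 fun hc => by simp at hc⟩
        · simp only [if_neg hq]
          refine ⟨fun j hj => by simp at hj, fun _ => ?_⟩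
          have hdrop : st' = List.drop q (i :: st) := hd.1
          have hle : q ≤ st.length + 1 := by simpa using hd.2
          constructor
          · rw [hdrop]
            obtain ⟨q', rfl⟩ := Nat.exists_eq_succ_of_ne_zero hq
            simp
          · omega
    · by_cases h2 : c = ']'
      · subst h2
        simp only [pvLoopA, Char.reduceEq, reduceIte] at h
        cases st with
        | nil => simp at h
        | cons k t =>
          have hmain := ih (i + 1) t st' h
          rw [hidx2] at hmain
          rcases hP : pvPass2P cs.reverse (i + cs.length) 0 with ⟨r, q⟩
          rw [hP] at hmain
          cases r with
          | some j =>
            simp only []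
            exact ⟨fun j' hj' => by cases hj'; exact hmain.1 _ rfl,
                   fun hc => by simp at hc⟩
          | none =>
            simp only [Char.reduceEq, reduceIte]
            have hd := hmain.2 rfl
            simp only at hd
            refine ⟨fun j hj => by simp at hj, fun _ => ?_⟩
            exact ⟨by simpa [List.drop_succ_cons] using hd.1,
                   by simpa using Nat.succ_le_succ hd.2⟩
      · simp only [pvLoopA, if_neg h1, if_neg h2] at h
        have hmain := ih (i + 1) st st' h
        rw [hidx2] at hmain
        rcases hP : pvPass2P cs.reverse (i + cs.length) 0 with ⟨r, q⟩
        rw [hP] at hmain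
        cases r with
        | some j =>
          simp only []
          exact ⟨fun j' hj' => by cases hj'; exact hmain.1 _ rfl,
                 fun hc => by simp at hc⟩
        | none =>
          simp only [if_neg h1, if_neg h2]
          have hd := hmain.2 rfl
          simp only at hd
          exact ⟨fun j hj => by simp at hj, fun _ => hd⟩

-- ===== VERDICT (by name: the statement is the Claim_ definition above) =====
theorem remove_unmatched_brackets_spec : Claim_equal_remove_unmatched_brackets := by
  intro s _ _
  unfold Spec_remove_unmatched_brackets
  unfold remove_unmatched_brackets remove_unmatched_brackets_alt
  have hp1 := pvPass1_eq_loopA s.toList 0 []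
  simp only [List.length_nil] at hp1
  rw [hp1, pvPass2_eq_P]
  cases hA : pvLoopA s.toList 0 [] with
  | inl j => simp
  | inr st' =>
    simp only []
    have hG := pvG s.toList 0 [] st' hA
    simp only [Nat.zero_add] at hG
    cases hP : (pvPass2P s.toList.reverse (s.toList.length - 1) 0).1 with
    | some j =>
      have hhead := hG.1 j hP
      cases st' with
      | nil => simp at hhead
      | cons k t =>
        simp at hhead
        subst hhead
        exact pvTrim_eq _
    | none =>
      have hdrop : st' = [] := by simpa using (hG.2 hP).1
      subst hdrop
      exact pvTrim_eq _
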